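-- pv_equiv track=rewrite | github.com/Honyant/vlm-interventions | haco/run_main_exp/analyze.py | find_intervention_segments
-- ===== SOURCE A (Python) =====
-- def find_intervention_segments(trajectory_data, context_window=4):
--     segments = []
--     for i in range(len(trajectory_data)):
--         if trajectory_data[i][2]:
--             start_idx = max(0, i - context_window)
--             end_idx = min(len(trajectory_data), i + 1)
--             segments.append((start_idx, end_idx))
--
--     if segments:
--         merged = []
--         current_start, current_end = segments[0]
--         for start, end in segments[1:]:
--             if start <= current_end:
--                 current_end = max(current_end, end)
--             else:
--                 merged.append((current_start, current_end))
--                 current_start, current_end = start, end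
--         merged.append((current_start, current_end))
--         return merged
--     return []
-- ===== SOURCE B (Python) =====
-- def find_intervention_segments(trajectory_data, context_window=4):
--     flagged = [i for i, step in enumerate(trajectory_data) if step[2]]
--     result = []
--     group = []
--     for i in flagged:
--         if group and i - group[-1] > context_window + 1:
--             result.append((max(0, group[0] - context_window), group[-1] + 1))
--             group = []
--         group.append(i)
--     if group:
--         result.append((max(0, group[0] - context_window), group[-1] + 1))
--     return result
-- ===== Notes on version B (the rewrite author's own statement) =====
-- stated objective: simpler
-- what changed: Instead of building a per-flagged-index interval list and then merging overlapping/adjacent intervals in a second pass, B collects the flagged indices and groups them directly by gap (next index within context_window+1 of the previous), emitting one window per group, so no intermediate interval list is ever built.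
import Mathlib
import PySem

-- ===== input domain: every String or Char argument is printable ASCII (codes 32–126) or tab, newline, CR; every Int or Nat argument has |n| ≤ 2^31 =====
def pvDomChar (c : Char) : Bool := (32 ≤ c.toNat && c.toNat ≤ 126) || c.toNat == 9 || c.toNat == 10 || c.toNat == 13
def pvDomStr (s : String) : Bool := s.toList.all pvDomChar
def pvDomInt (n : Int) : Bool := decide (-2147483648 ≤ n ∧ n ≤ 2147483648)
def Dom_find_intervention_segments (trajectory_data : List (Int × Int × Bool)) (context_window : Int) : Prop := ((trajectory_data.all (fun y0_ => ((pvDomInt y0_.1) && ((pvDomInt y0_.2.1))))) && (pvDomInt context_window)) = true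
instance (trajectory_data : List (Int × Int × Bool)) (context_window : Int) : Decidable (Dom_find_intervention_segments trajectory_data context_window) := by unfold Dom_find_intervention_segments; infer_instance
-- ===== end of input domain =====

-- B replaces A's per-index interval list plus interval-merge pass by grouping the flagged
-- indices directly by gap (objective: simpler — no intermediate interval list is built).

-- ===== PORT A =====
-- the merge loop: 'for start, end in segments[1:]' carrying (current_start, current_end, merged)
def pvMergeA : List (Int × Int) → Int → Int → List (Int × Int) → List (Int × Int)
  | [], cs, ce, merged => merged ++ [(cs, ce)]
  | (s, e) :: rest, cs, ce, merged =>
      if s ≤ ce then pvMergeA rest cs (max ce e) merged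
      else pvMergeA rest s e (merged ++ [(cs, ce)])

def find_intervention_segments (trajectory_data : List (Int × Int × Bool)) (context_window : Int) : List (Int × Int) :=
  let segments := (PySem.List.pyRange 0 (trajectory_data.length : Int) 1).foldl
    (fun acc i =>
      match PySem.List.pyGet? trajectory_data i with
      | some t =>
          if t.2.2 then
            acc ++ [(max 0 (i - context_window), min (trajectory_data.length : Int) (i + 1))]
          else acc
      | none => acc) []   -- none unreachable: i ranges over range(len(trajectory_data))
  match segments with
  | [] => []
  | (cs, ce) :: rest => pvMergeA rest cs ce []

-- ===== PORT B =====
-- result.append((max(0, group[0] - context_window), group[-1] + 1))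
def pvGroupSeg (cw : Int) (group : List Int) : Int × Int :=
  (max 0 (group.headD 0 - cw), group.getLastD 0 + 1)

-- loop body over the flagged indices, state = (result, group)
def pvAltStep (cw : Int) (st : List (Int × Int) × List Int) (i : Int) : List (Int × Int) × List Int :=
  if st.2 ≠ [] ∧ i - st.2.getLastD 0 > cw + 1 then
    (st.1 ++ [pvGroupSeg cw st.2], [i])
  else (st.1, st.2 ++ [i])

def find_intervention_segments_alt (trajectory_data : List (Int × Int × Bool)) (context_window : Int) : List (Int × Int) :=
  let flagged := (PySem.List.enumerate trajectory_data 0).filterMap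
    (fun p => if p.2.2.2 then some p.1 else none)
  let st := flagged.foldl (pvAltStep context_window) ([], [])
  if st.2 ≠ [] then st.1 ++ [pvGroupSeg context_window st.2] else st.1

-- ===== PRECONDITION & SPEC =====
def Spec_find_intervention_segments (trajectory_data : List (Int × Int × Bool)) (context_window : Int) (out : List (Int × Int)) : Prop := out = find_intervention_segments_alt trajectory_data context_window
instance (trajectory_data : List (Int × Int × Bool)) (context_window : Int) (out : List (Int × Int)) : Decidable (Spec_find_intervention_segments trajectory_data context_window out) := by unfold Spec_find_intervention_segments; infer_instance

-- ===== CLAIM (what is proved, stated in full; the proofs are below) =====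
def Claim_equal_find_intervention_segments : Prop := ∀ (trajectory_data : List (Int × Int × Bool)) (context_window : Int), Dom_find_intervention_segments trajectory_data context_window → Spec_find_intervention_segments trajectory_data context_window (find_intervention_segments trajectory_data context_window)

-- ===== LEMMAS AND PROOFS =====

-- A's first loop produces exactly the flagged indices mapped to their raw windows
lemma pvSegListA (td : List (Int × Int × Bool)) (cw : Int) :
    ∀ (l : List Int) (acc : List (Int × Int)),
    (∀ i ∈ l, 0 ≤ i ∧ i < (td.length : Int)) →
    l.foldl (fun acc i =>
      match PySem.List.pyGet? td i with
      | some t => if t.2.2 then acc ++ [(max 0 (i - cw), min (td.length : Int) (i + 1))] else acc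
      | none => acc) acc
    = acc ++ (l.filterMap (fun j =>
        if (PySem.List.pyGetD td j (0, 0, false)).2.2 then some j else none)).map
        (fun i => (max 0 (i - cw), i + 1)) := by
  intro l
  induction l with
  | nil => intro acc _; simp
  | cons x xs ih =>
      intro acc h
      have hx := h x (by simp)
      have hget : PySem.List.pyGet? td x = some (PySem.List.pyGetD td x (0, 0, false)) := by
        rw [PySem.List.pyGet?_eq_some_getElem td hx.1 hx.2,
            PySem.List.pyGetD_eq_getElem td (0, 0, false) hx.1 hx.2]
      have hmin : min (td.length : Int) (x + 1) = x + 1 := by omega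
      simp only [List.foldl_cons, List.filterMap_cons, hget]
      by_cases hf : (PySem.List.pyGetD td x (0, 0, false)).2.2
      · simp only [hf, if_pos, hmin]
        rw [ih _ (fun i hi => h i (by simp [hi]))]
        simp
      · simp only [hf, Bool.false_eq_true, if_neg, not_false_iff]
        exact ih _ (fun i hi => h i (by simp [hi]))

-- main correspondence: A's interval merge over the mapped windows = B's gap grouping
lemma pvMerge_eq_group (cw : Int) :
    ∀ (F : List Int) (res : List (Int × Int)) (group : List Int) (b : Int),
    group ≠ [] → group.getLastD 0 = b → 0 ≤ b → List.IsChain (· < ·) (b :: F) →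
    pvMergeA (F.map (fun i => (max 0 (i - cw), i + 1))) (max 0 (group.headD 0 - cw)) (b + 1) res
    = (let st := F.foldl (pvAltStep cw) (res, group);
       if st.2 ≠ [] then st.1 ++ [pvGroupSeg cw st.2] else st.1) := by
  intro F
  induction F with
  | nil =>
      intro res group b hne hlast hb _
      simp only [List.map_nil, List.foldl_nil, pvMergeA]
      rw [if_pos hne, pvGroupSeg, hlast]
  | cons x xs ih =>
      intro res group b hne hlast hb hchain
      rcases List.isChain_cons_cons.mp hchain with ⟨hbx, hchain'⟩
      simp only [List.map_cons, List.foldl_cons, pvMergeA]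
      by_cases hm : x - b ≤ cw + 1
      · -- no gap: A extends the current interval, B extends the current group
        have hcond : max 0 (x - cw) ≤ b + 1 := by omega
        have hmax : max (b + 1) (x + 1) = x + 1 := by omega
        rw [if_pos hcond, hmax]
        have hstep : pvAltStep cw (res, group) x = (res, group ++ [x]) := by
          rw [pvAltStep, if_neg (by
            rintro ⟨-, hgt⟩
            rw [show ((res, group) : List (Int × Int) × List Int).2 = group from rfl, hlast] at hgt
            omega)]
        rw [hstep]
        have hh : max 0 (group.headD 0 - cw) = max 0 ((group ++ [x]).headD 0 - cw) := by
          cases group with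
          | nil => exact absurd rfl hne
          | cons g gs => simp
        rw [hh]
        exact ih res (group ++ [x]) x (by simp) (by simp) (by omega) hchain'
      · -- gap: A closes the current interval, B flushes the current group
        have hcond : ¬ (max 0 (x - cw) ≤ b + 1) := by omega
        rw [if_neg hcond]
        have hstep : pvAltStep cw (res, group) x = (res ++ [pvGroupSeg cw group], [x]) := by
          rw [pvAltStep, if_pos (⟨hne, by
            rw [show ((res, group) : List (Int × Int) × List Int).2 = group from rfl, hlast]; omega⟩ :
              ((res, group) : List (Int × Int) × List Int).2 ≠ [] ∧ _)]
        rw [hstep]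
        have hgs : pvGroupSeg cw group = (max 0 (group.headD 0 - cw), b + 1) := by
          rw [pvGroupSeg, hlast]
        rw [← hgs]
        exact ih (res ++ [pvGroupSeg cw group]) [x] x (by simp) rfl (by omega) hchain'

-- B's flagged list, rewritten over the index range
lemma pvFlagged_eq (td : List (Int × Int × Bool)) :
    (PySem.List.enumerate td 0).filterMap (fun p => if p.2.2.2 then some p.1 else none)
    = (PySem.List.pyRange 0 (td.length : Int) 1).filterMap
        (fun j => if (PySem.List.pyGetD td j (0, 0, false)).2.2 then some j else none) := by
  rw [PySem.List.enumerate_eq_map_pyRange td (0, 0, false), List.filterMap_map]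
  rfl

-- the flagged-index list is strictly increasing
lemma pvFlagged_sorted (td : List (Int × Int × Bool)) :
    ((PySem.List.pyRange 0 (td.length : Int) 1).filterMap
        (fun j => if (PySem.List.pyGetD td j (0, 0, false)).2.2 then some j else none)).Pairwise (· < ·) := by
  refine List.Pairwise.filterMap _ ?_ (PySem.List.pairwise_lt_pyRange_one 0 _)
  intro a a' hab x hx y hy
  split at hx <;> split at hy <;> simp_all

-- …and its members are indices of td
lemma pvFlagged_mem (td : List (Int × Int × Bool)) (x : Int)
    (hx : x ∈ (PySem.List.pyRange 0 (td.length : Int) 1).filterMap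
        (fun j => if (PySem.List.pyGetD td j (0, 0, false)).2.2 then some j else none)) :
    0 ≤ x ∧ x < (td.length : Int) := by
  rcases List.mem_filterMap.mp hx with ⟨j, hj, hjx⟩
  have := PySem.List.mem_pyRange_one.mp hj
  split at hjx <;> simp_all

-- the shared tail: A's match-and-merge = B's fold-and-flush, for any sorted nonneg index list
lemma pvFinal (cw : Int) (F : List Int) (hpw : F.Pairwise (· < ·)) (h0 : ∀ x ∈ F, 0 ≤ x) :
    (match F.map (fun i => (max 0 (i - cw), i + 1)) with
     | [] => []
     | (cs, ce) :: rest => pvMergeA rest cs ce []) =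
    (let st := F.foldl (pvAltStep cw) ([], []);
     if st.2 ≠ [] then st.1 ++ [pvGroupSeg cw st.2] else st.1) := by
  cases F with
  | nil => simp
  | cons a F' =>
      have hchain : List.IsChain (· < ·) (a :: F') := List.isChain_iff_pairwise.mpr hpw
      have ha : 0 ≤ a := h0 a (by simp)
      have hstep1 : pvAltStep cw ([], []) a = ([], [a]) := by
        rw [pvAltStep, if_neg (by rintro ⟨h, -⟩; exact h rfl)]; rfl
      simp only [List.map_cons, List.foldl_cons, hstep1]
      exact pvMerge_eq_group cw F' [] [a] a (by simp) rfl ha hchain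

-- ===== VERDICT (by name: the statement is the Claim_ definition above) =====
theorem find_intervention_segments_spec : Claim_equal_find_intervention_segments := by
  intro td cw _
  unfold Spec_find_intervention_segments
  unfold find_intervention_segments find_intervention_segments_alt
  rw [pvFlagged_eq,
      pvSegListA td cw (PySem.List.pyRange 0 (td.length : Int) 1) []
        (fun i hi => PySem.List.mem_pyRange_one.mp hi)]
  simp only [List.nil_append]
  exact pvFinal cw _ (pvFlagged_sorted td) (fun x hx => (pvFlagged_mem td x hx).1)
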